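-- pv_equiv track=rewrite | github.com/wcarey-gmu/universal-partial-tori | code/apps/array-finder.py | generateUpmatrix
-- ===== SOURCE A (Python) =====
-- def generateUpword(n, l, a):
--     s = ""
--     while n > 0:
--         if n % (a + 1) == a:
--             s = "⋄" + s
--             n -= a
--         else:
--             s = str(n % (a + 1)) + s
--         n //= (a + 1)
--     while len(s) < l:
--         s = "0" + s
--     return s
--
-- def generateUpmatrix(n, l, w, a):
--     m = ["0" * l for i in range(w)]
--     i = w - 1
--     while n > 0:
--         q = n % ((a + 1) ** l)
--         m[i] = generateUpword(q, l, a)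
--         n //= ((a + 1) ** l)
--         i -= 1
--
--     return m
-- ===== SOURCE B (Python) =====
-- def generateUpmatrix(n, l, w, a):
--     rows = ["0" * l for _ in range(w)]
--     b = a + 1
--     digits = []  # base-(a+1) digits of n, least significant first, rendered
--     while n > 0:
--         d = n % b
--         digits.append("\u22c4" if d == a else str(d))
--         n //= b
--     i = w - 1
--     k = 0
--     while k < len(digits):
--         group = digits[k:k + l]
--         while group and group[-1] == "0":  # drop leading zeros of this word
--             group.pop()
--         rows[i] = "".join(reversed(group)).rjust(l, "0")
--         i -= 1
--         k += l
--     return rows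
-- ===== Notes on version B (the rewrite author's own statement) =====
-- stated objective: alternative
-- what changed: B extracts the whole base-(a+1) digit sequence of n once (least-significant first, each digit rendered immediately), then slices it into l-digit groups and writes each rendered, zero-padded row directly, instead of A's outer loop that re-runs a per-chunk digit-extraction helper on n mod (a+1)**l at every row.
-- outside the precondition, e.g. on generateUpmatrix(3, 1, 2, -3): A returns ['0', '0'], B returns ['0', '-1']
import Mathlib
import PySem

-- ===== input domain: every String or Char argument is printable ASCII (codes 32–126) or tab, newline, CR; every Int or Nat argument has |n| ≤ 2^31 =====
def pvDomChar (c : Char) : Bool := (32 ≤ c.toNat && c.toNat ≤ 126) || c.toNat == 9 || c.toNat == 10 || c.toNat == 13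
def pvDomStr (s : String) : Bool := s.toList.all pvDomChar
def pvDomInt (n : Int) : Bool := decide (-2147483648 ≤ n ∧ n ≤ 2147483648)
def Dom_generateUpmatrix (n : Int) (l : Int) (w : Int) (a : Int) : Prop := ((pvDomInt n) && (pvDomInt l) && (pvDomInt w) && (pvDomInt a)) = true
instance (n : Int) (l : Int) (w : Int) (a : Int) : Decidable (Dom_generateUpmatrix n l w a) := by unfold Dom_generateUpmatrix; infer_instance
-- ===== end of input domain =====

-- B replaces A's per-row re-extraction (generateUpword on n mod (a+1)**l each iteration) by one pass that
-- renders the full base-(a+1) digit sequence of n and then slices it into l-digit rows; same return value.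

-- ===== PORT A =====
-- Rows are built on the List Char side (PySem.Chars convention) and wrapped with String.ofList.
-- "0" * l (built with String.push: exact for Python's "0"*l, and as compact as Python's string)
def pvZeros (l : Int) : String := Nat.fold l.toNat (fun _ _ s => s.push '0') ""

-- m[i] = v with Python's negative indexing; an out-of-range index is IndexError in Python — excluded by Pre_
def pvSetAt (m : List String) (i : Int) (v : String) : List String :=
  let j : Int := if i < 0 then i + m.length else i
  if 0 ≤ j then m.set j.toNat v else m

-- 'while n > 0' of generateUpword; fuel bounds the iteration count (≥ it on every input Pre_ admits)
def pvUpwordLoop (fuel : Nat) (n : Int) (a : Int) (s : List Char) : List Char :=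
  match fuel with
  | 0 => s
  | fuel + 1 =>
    if 0 < n then
      if PySem.Int.mod n (a + 1) = a then
        pvUpwordLoop fuel (PySem.Int.floordiv (n - a) (a + 1)) a ('⋄' :: s)
      else
        pvUpwordLoop fuel (PySem.Int.floordiv n (a + 1)) a (PySem.Int.toChars (PySem.Int.mod n (a + 1)) ++ s)
    else s

-- 'while len(s) < l: s = "0" + s'
def pvPadLoop (fuel : Nat) (l : Int) (s : List Char) : List Char :=
  match fuel with
  | 0 => s
  | fuel + 1 => if (s.length : Int) < l then pvPadLoop fuel l ('0' :: s) else s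

def pvUpword (n : Int) (l : Int) (a : Int) : String :=
  String.ofList (pvPadLoop (l.toNat + 1) l (pvUpwordLoop (n.toNat + 1) n a []))

-- outer 'while n > 0' of generateUpmatrix; (a+1)**l is an Int power (l < 0 would be a Python float — excluded by Pre_)
def pvMatrixLoop (fuel : Nat) (n l a : Int) (m : List String) (i : Int) : List String :=
  match fuel with
  | 0 => m
  | fuel + 1 =>
    if 0 < n then
      pvMatrixLoop fuel (PySem.Int.floordiv n ((a + 1) ^ l.toNat)) l a
        (pvSetAt m i (pvUpword (PySem.Int.mod n ((a + 1) ^ l.toNat)) l a)) (i - 1)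
    else m

def generateUpmatrix (n : Int) (l : Int) (w : Int) (a : Int) : List String :=
  pvMatrixLoop (n.toNat + 1) n l a ((List.range w.toNat).map (fun _ => pvZeros l)) (w - 1)

-- ===== PORT B =====
-- digit-collection loop of Source B: all base-(a+1) digits of n, least significant first, rendered
def pvDigitsLoop (fuel : Nat) (n a : Int) (ds : List String) : List String :=
  match fuel with
  | 0 => ds
  | fuel + 1 =>
    if 0 < n then
      pvDigitsLoop fuel (PySem.Int.floordiv n (a + 1)) a
        (ds ++ [if PySem.Int.mod n (a + 1) = a then "⋄" else PySem.Int.toStr (PySem.Int.mod n (a + 1))])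
    else ds

-- 'while group and group[-1] == "0": group.pop()'
def pvStripZeros (g : List String) : List String :=
  if h : g = [] then g
  else if g.getLast h = "0" then pvStripZeros g.dropLast else g
termination_by g.length
decreasing_by simp [List.length_dropLast]; exact List.length_pos_iff.mpr h

-- s.rjust(l, "0")
def pvRjust (s : List Char) (l : Int) : List Char :=
  if (s.length : Int) < l then List.replicate (l.toNat - s.length) '0' ++ s else s

-- "".join(reversed(group))
def pvJoinRev (g : List String) : List Char := (g.reverse.map String.toList).flatten

-- 'while k < len(digits)' of Source B; fuel bounds the iteration count (k grows by l ≥ 1 inside Pre_)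
def pvGroupLoop (fuel : Nat) (ds : List String) (rows : List String) (i k l : Int) : List String :=
  match fuel with
  | 0 => rows
  | fuel + 1 =>
    if k < (ds.length : Int) then
      pvGroupLoop fuel ds
        (pvSetAt rows i (String.ofList (pvRjust (pvJoinRev (pvStripZeros (PySem.List.slice ds (some k) (some (k + l))))) l)))
        (i - 1) (k + l) l
    else rows

def generateUpmatrix_alt (n : Int) (l : Int) (w : Int) (a : Int) : List String :=
  let ds := pvDigitsLoop (n.toNat + 1) n a []
  pvGroupLoop (ds.length + 1) ds ((List.range w.toNat).map (fun _ => pvZeros l)) (w - 1) 0 l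

-- ===== PRECONDITION & SPEC =====
-- Pre_ admits every input on which the Python A returns normally except accidents of negative bases:
-- for n ≤ 0 A always returns the all-'0' matrix; for n > 0 it needs a ≥ 1 (a = 0 loops forever, a = -1
-- divides by zero, and a ≤ -2 either fails or returns accidental values of CPython's negative-base floor
-- division — the latter inputs are the one excluded-but-returning corner, see the cite), l ≥ 1 (l = 0
-- loops forever, l < 0 makes (a+1)**l a float), w ≥ 1, and n must have at most 2·l·w base-(a+1) digits,
-- i.e. n < (a+1)^(2·l·w) — stated as Nat.log (a+1) n < 2·l·w so the instance evaluates the logarithm, not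
-- the power — since otherwise A's row index escapes even Python's negative range: IndexError.
def Pre_generateUpmatrix (n : Int) (l : Int) (w : Int) (a : Int) : Prop :=
  n ≤ 0 ∨ (1 ≤ a ∧ 1 ≤ l ∧ 1 ≤ w ∧ Nat.log (a + 1).toNat n.toNat < (2 * l * w).toNat)
instance (n : Int) (l : Int) (w : Int) (a : Int) : Decidable (Pre_generateUpmatrix n l w a) := by
  unfold Pre_generateUpmatrix; infer_instance

def pvWitness_generateUpmatrix : Int × Int × Int × Int := (131, 2, 3, 2)

def Spec_generateUpmatrix (n : Int) (l : Int) (w : Int) (a : Int) (out : List String) : Prop := out = generateUpmatrix_alt n l w a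
instance (n : Int) (l : Int) (w : Int) (a : Int) (out : List String) : Decidable (Spec_generateUpmatrix n l w a out) := by unfold Spec_generateUpmatrix; infer_instance

-- ===== CLAIM (what is proved, stated in full; the proofs are below) =====
def Claim_equal_generateUpmatrix : Prop := ∀ (n : Int) (l : Int) (w : Int) (a : Int), Dom_generateUpmatrix n l w a → Pre_generateUpmatrix n l w a → Spec_generateUpmatrix n l w a (generateUpmatrix n l w a)

-- ===== LEMMAS AND PROOFS =====

-- the canonical digit list of n (the expression generateUpmatrix_alt starts pvDigitsLoop with)
def pvDigits (n a : Int) : List String := pvDigitsLoop (n.toNat + 1) n a []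

theorem pv_digitsLoop_nonpos (f : Nat) (n a : Int) (ds : List String) (hn : n ≤ 0) :
    pvDigitsLoop f n a ds = ds := by
  have h : ¬ 0 < n := by omega
  cases f <;> simp [pvDigitsLoop, h]

theorem pv_digitsLoop_succ (f : Nat) (n a : Int) (ds : List String) (hn : 0 < n) :
    pvDigitsLoop (f + 1) n a ds =
      pvDigitsLoop f (PySem.Int.floordiv n (a + 1)) a
        (ds ++ [if PySem.Int.mod n (a + 1) = a then "⋄" else PySem.Int.toStr (PySem.Int.mod n (a + 1))]) := by
  simp only [pvDigitsLoop, if_pos hn]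

theorem pv_digitsLoop_append (f : Nat) (n a : Int) (ds : List String) :
    pvDigitsLoop f n a ds = ds ++ pvDigitsLoop f n a [] := by
  induction f generalizing n ds with
  | zero => simp [pvDigitsLoop]
  | succ f ih =>
    by_cases hn : 0 < n
    · rw [pv_digitsLoop_succ _ _ _ _ hn, pv_digitsLoop_succ _ _ _ [] hn,
          ih (PySem.Int.floordiv n (a + 1)) (ds ++ [_]),
          ih (PySem.Int.floordiv n (a + 1)) ([] ++ [_])]
      simp
    · rw [pv_digitsLoop_nonpos _ _ _ _ (by omega), pv_digitsLoop_nonpos _ _ _ [] (by omega)]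
      simp

theorem pv_fdiv_facts {n b : Int} (hn : 0 < n) (hb : 2 ≤ b) :
    0 ≤ PySem.Int.floordiv n b ∧ (PySem.Int.floordiv n b).toNat < n.toNat := by
  rw [PySem.Int.floordiv_eq_ediv_of_pos (by omega)]
  have hq : 0 ≤ n / b := Int.ediv_nonneg (by omega) (by omega)
  have h3 : 2 * (n / b) ≤ b * (n / b) := by nlinarith
  have h4 := Int.ediv_add_emod n b
  have h5 := Int.emod_nonneg n (by omega : b ≠ 0)
  have hlt : n / b < n := by linarith
  exact ⟨hq, by omega⟩

theorem pv_digitsLoop_stable (a : Int) (ha : 1 ≤ a) :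
    ∀ f g (n : Int), 0 ≤ n → n.toNat ≤ f → n.toNat ≤ g →
      pvDigitsLoop f n a [] = pvDigitsLoop g n a [] := by
  intro f
  induction f with
  | zero =>
    intro g n h0 hf _
    have : n = 0 := by omega
    subst this
    rw [pv_digitsLoop_nonpos 0 0 a [] le_rfl, pv_digitsLoop_nonpos g 0 a [] le_rfl]
  | succ f ih =>
    intro g n h0 hf hg
    by_cases hn : 0 < n
    · obtain ⟨g', rfl⟩ : ∃ g', g = g' + 1 := ⟨g - 1, by omega⟩
      obtain ⟨hd0, hdlt⟩ := pv_fdiv_facts hn (by omega : 2 ≤ a + 1)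
      rw [pv_digitsLoop_succ _ _ _ _ hn, pv_digitsLoop_succ _ _ _ _ hn,
          pv_digitsLoop_append, pv_digitsLoop_append g',
          ih g' (PySem.Int.floordiv n (a + 1)) hd0 (by omega) (by omega)]
    · rw [pv_digitsLoop_nonpos (f + 1) n a [] (by omega), pv_digitsLoop_nonpos g n a [] (by omega)]

theorem pv_digits_nonpos {n a : Int} (hn : n ≤ 0) : pvDigits n a = [] :=
  pv_digitsLoop_nonpos _ _ _ _ hn

theorem pv_digits_unfold {n a : Int} (ha : 1 ≤ a) (hn : 0 < n) :
    pvDigits n a =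
      (if PySem.Int.mod n (a + 1) = a then "⋄" else PySem.Int.toStr (PySem.Int.mod n (a + 1)))
        :: pvDigits (PySem.Int.floordiv n (a + 1)) a := by
  obtain ⟨hd0, hdlt⟩ := pv_fdiv_facts hn (by omega : 2 ≤ a + 1)
  unfold pvDigits
  rw [pv_digitsLoop_succ _ _ _ _ hn, pv_digitsLoop_append,
      pv_digitsLoop_stable a ha n.toNat ((PySem.Int.floordiv n (a + 1)).toNat + 1) _ hd0 (by omega) (by omega)]
  simp

theorem pv_digits_ne_nil {n a : Int} (ha : 1 ≤ a) (hn : 0 < n) : pvDigits n a ≠ [] := by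
  rw [pv_digits_unfold ha hn]; simp

-- str(d) for d ≥ 1 is never the string "0"
theorem pv_natDigits_ne (D : Nat) (hD1 : 1 ≤ D) : Nat.toDigits 10 D ≠ ['0'] := by
  intro h'
  by_cases hsm : D < 10
  · rw [Nat.toDigits_of_lt_base hsm] at h'
    have h3 : D.digitChar = '0' := List.singleton_inj.mp h'
    interval_cases D <;> exact absurd h3 (by decide)
  · have hle : (Nat.toDigits 10 D).length ≤ 1 := by rw [h']; simp
    rw [Nat.length_toDigits_le_iff (by omega) (by omega)] at hle
    omega

theorem pv_toStr_ne_zero {d : Int} (hd : 1 ≤ d) : PySem.Int.toStr d ≠ "0" := by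
  intro h
  have h' : PySem.Int.toChars d = ['0'] := by
    have h2 := congrArg String.toList h
    simpa [PySem.Int.toStr] using h2
  rw [PySem.Int.toChars, if_neg (by omega)] at h'
  exact pv_natDigits_ne d.toNat (by omega) h'

-- the most significant digit of n ≥ 0 never renders as "0" (and for n = 0 there is no digit at all)
theorem pv_digits_last_aux (a : Int) (ha : 1 ≤ a) :
    ∀ (N : Nat) (n : Int), 0 ≤ n → n.toNat ≤ N → (pvDigits n a).getLast? ≠ some "0" := by
  intro N
  induction N with
  | zero =>
    intro n h0 hN
    rw [pv_digits_nonpos (by omega)]; simp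
  | succ N ih =>
    intro n h0 hN
    by_cases hn : 0 < n
    · obtain ⟨hd0, hdlt⟩ := pv_fdiv_facts hn (by omega : 2 ≤ a + 1)
      rw [pv_digits_unfold ha hn]
      by_cases hz : 0 < PySem.Int.floordiv n (a + 1)
      · rw [pv_digits_unfold ha hz, List.getLast?_cons_cons, ← pv_digits_unfold ha hz]
        exact ih (PySem.Int.floordiv n (a + 1)) hd0 (by omega)
      · have hz' : PySem.Int.floordiv n (a + 1) = 0 := by omega
        have hnb : n < a + 1 := by
          have h1 := (PySem.Int.floordiv_lt_iff_lt_mul (a := n) (b := a + 1) (q := 1)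
            (by omega : (0:Int) < a + 1)).mp (by omega)
          omega
        have hmod : PySem.Int.mod n (a + 1) = n := by
          rw [PySem.Int.mod_eq_emod_of_pos (by omega), Int.emod_eq_of_lt h0 hnb]
        rw [hz', pv_digits_nonpos le_rfl]
        by_cases hda : PySem.Int.mod n (a + 1) = a
        · simp [hda]
        · simp only [if_neg hda, List.getLast?_singleton, ne_eq, Option.some.injEq]
          rw [hmod]
          exact pv_toStr_ne_zero (by omega)
    · rw [pv_digits_nonpos (by omega)]; simp

theorem pv_digits_last {n a : Int} (ha : 1 ≤ a) (h0 : 0 ≤ n) :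
    (pvDigits n a).getLast? ≠ some "0" :=
  pv_digits_last_aux a ha n.toNat n h0 le_rfl

theorem pv_joinRev_nil : pvJoinRev [] = [] := by simp [pvJoinRev]

theorem pv_joinRev_cons (x : String) (t : List String) :
    pvJoinRev (x :: t) = pvJoinRev t ++ x.toList := by
  simp [pvJoinRev]

-- n -= a before n //= (a+1) does not change the quotient when n % (a+1) == a
theorem pv_fdiv_sub_mod {n a : Int} (hb : 0 < a + 1) (hm : PySem.Int.mod n (a + 1) = a) :
    PySem.Int.floordiv (n - a) (a + 1) = PySem.Int.floordiv n (a + 1) := by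
  have h := PySem.Int.floordiv_mul_add_mod n (a + 1)
  have hna : n - a = PySem.Int.floordiv n (a + 1) * (a + 1) := by omega
  rw [hna, PySem.Int.floordiv_eq_ediv_of_pos hb, Int.mul_ediv_cancel _ (by omega)]

theorem pv_upwordLoop_nonpos (f : Nat) (n a : Int) (s : List Char) (hn : n ≤ 0) :
    pvUpwordLoop f n a s = s := by
  have h : ¬ 0 < n := by omega
  cases f <;> simp [pvUpwordLoop, h]

-- pvUpwordLoop produces the reversed join of the rendered digit list, prepended to s
theorem pv_upwordLoop_eq (a : Int) (ha : 1 ≤ a) :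
    ∀ (N : Nat) (f : Nat) (n : Int) (s : List Char), 0 ≤ n → n.toNat ≤ N → n.toNat ≤ f →
      pvUpwordLoop f n a s = pvJoinRev (pvDigits n a) ++ s := by
  intro N
  induction N with
  | zero =>
    intro f n s h0 hN hf
    rw [pv_upwordLoop_nonpos _ _ _ _ (by omega), pv_digits_nonpos (by omega), pv_joinRev_nil]
    simp
  | succ N ih =>
    intro f n s h0 hN hf
    by_cases hn : 0 < n
    · obtain ⟨hd0, hdlt⟩ := pv_fdiv_facts hn (by omega : 2 ≤ a + 1)
      obtain ⟨f', rfl⟩ : ∃ x, f = x + 1 := ⟨f - 1, by omega⟩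
      rw [pv_digits_unfold ha hn]
      by_cases hm : PySem.Int.mod n (a + 1) = a
      · simp only [pvUpwordLoop, if_pos hn, if_pos hm]
        rw [pv_fdiv_sub_mod (by omega) hm,
            ih f' (PySem.Int.floordiv n (a + 1)) ('⋄' :: s) hd0 (by omega) (by omega),
            pv_joinRev_cons]
        simp
      · simp only [pvUpwordLoop, if_pos hn, if_neg hm]
        rw [ih f' (PySem.Int.floordiv n (a + 1)) _ hd0 (by omega) (by omega), pv_joinRev_cons]
        simp [PySem.Int.toStr]
    · rw [pv_upwordLoop_nonpos _ _ _ _ (by omega), pv_digits_nonpos (by omega), pv_joinRev_nil]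
      simp

theorem pv_rjust_cons {s : List Char} {l : Int} (h : (s.length : Int) < l) :
    pvRjust ('0' :: s) l = pvRjust s l := by
  unfold pvRjust
  rw [if_pos h]
  by_cases h2 : ((('0' :: s).length : Int) < l)
  · rw [if_pos h2]
    have hk : l.toNat - s.length = (l.toNat - ('0' :: s).length) + 1 := by
      simp only [List.length_cons]; omega
    rw [hk, List.replicate_succ']
    simp
  · rw [if_neg h2]
    have hk : l.toNat - s.length = 1 := by
      simp only [List.length_cons] at h2; omega
    rw [hk]
    simp

theorem pv_padLoop_eq (l : Int) : ∀ (f : Nat) (s : List Char), l.toNat - s.length ≤ f →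
    pvPadLoop f l s = pvRjust s l := by
  intro f
  induction f with
  | zero =>
    intro s hf
    have h : ¬ ((s.length : Int) < l) := by omega
    simp [pvPadLoop, pvRjust, h]
  | succ f ih =>
    intro s hf
    by_cases h : (s.length : Int) < l
    · simp only [pvPadLoop, if_pos h]
      rw [ih ('0' :: s) (by simp; omega), pv_rjust_cons h]
    · simp [pvPadLoop, pvRjust, h]

theorem pv_upword_eq {q l a : Int} (ha : 1 ≤ a) (hq : 0 ≤ q) :
    pvUpword q l a = String.ofList (pvRjust (pvJoinRev (pvDigits q a)) l) := by
  unfold pvUpword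
  rw [pv_upwordLoop_eq a ha q.toNat _ _ _ hq le_rfl (by omega), pv_padLoop_eq _ _ _ (by omega)]
  simp

-- arithmetic: base-(a+1) digit splitting, lifted from Nat
theorem pv_fdiv_fdiv {n b M : Int} (h0 : 0 ≤ n) (hb : 0 < b) (hM : 0 < M) :
    PySem.Int.floordiv (PySem.Int.floordiv n b) M = PySem.Int.floordiv n (b * M) := by
  lift n to ℕ using h0
  lift b to ℕ using (by omega : (0:Int) ≤ b)
  lift M to ℕ using (by omega : (0:Int) ≤ M)
  simp only [← Nat.cast_mul, PySem.Int.floordiv_natCast]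
  rw [Nat.div_div_eq_div_mul]

theorem pv_mod_mod {n b M : Int} (h0 : 0 ≤ n) (hb : 0 < b) (hM : 0 < M) :
    PySem.Int.mod (PySem.Int.mod n (b * M)) b = PySem.Int.mod n b := by
  lift n to ℕ using h0
  lift b to ℕ using (by omega : (0:Int) ≤ b)
  lift M to ℕ using (by omega : (0:Int) ≤ M)
  simp only [← Nat.cast_mul, PySem.Int.mod_natCast]
  rw [Nat.mod_mod_of_dvd n ⟨M, rfl⟩]

theorem pv_fdiv_mod {n b M : Int} (h0 : 0 ≤ n) (hb : 0 < b) (hM : 0 < M) :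
    PySem.Int.floordiv (PySem.Int.mod n (b * M)) b = PySem.Int.mod (PySem.Int.floordiv n b) M := by
  lift n to ℕ using h0
  lift b to ℕ using (by omega : (0:Int) ≤ b)
  lift M to ℕ using (by omega : (0:Int) ≤ M)
  simp only [← Nat.cast_mul, PySem.Int.mod_natCast, PySem.Int.floordiv_natCast]
  rw [Nat.mod_mul_right_div_self]

-- dropping l digits of n is dividing by (a+1)^l
theorem pv_digits_drop (a : Int) (ha : 1 ≤ a) :
    ∀ (lp : Nat) (n : Int), 0 ≤ n →
      pvDigits (PySem.Int.floordiv n ((a + 1) ^ lp)) a = (pvDigits n a).drop lp := by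
  intro lp
  induction lp with
  | zero =>
    intro n h0
    rw [pow_zero, PySem.Int.floordiv_eq_ediv_of_pos one_pos, Int.ediv_one, List.drop_zero]
  | succ lp ih =>
    intro n h0
    have hBpos : (0:Int) < (a + 1) ^ (lp + 1) := pow_pos (by omega) _
    by_cases hn : 0 < n
    · obtain ⟨hd0, _⟩ := pv_fdiv_facts hn (by omega : 2 ≤ a + 1)
      rw [pv_digits_unfold ha hn, List.drop_succ_cons, ← ih (PySem.Int.floordiv n (a + 1)) hd0,
          pow_succ' (a + 1) lp, ← pv_fdiv_fdiv h0 (by omega) (pow_pos (by omega) lp)]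
    · have hn0 : n = 0 := by omega
      subst hn0
      rw [show PySem.Int.floordiv 0 ((a + 1) ^ (lp + 1)) = 0 by
            rw [PySem.Int.floordiv_eq_ediv_of_pos hBpos, Int.zero_ediv]]
      rw [pv_digits_nonpos le_rfl]
      simp

theorem pv_digits_len_le (a : Int) (ha : 1 ≤ a) :
    ∀ (lp : Nat) (n : Int), 0 ≤ n → n < (a + 1) ^ lp → (pvDigits n a).length ≤ lp := by
  intro lp
  induction lp with
  | zero =>
    intro n h0 hlt
    rw [pow_zero] at hlt
    rw [pv_digits_nonpos (by omega)]
    simp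
  | succ lp ih =>
    intro n h0 hlt
    by_cases hn : 0 < n
    · obtain ⟨hd0, _⟩ := pv_fdiv_facts hn (by omega : 2 ≤ a + 1)
      rw [pv_digits_unfold ha hn]
      simp only [List.length_cons, Nat.add_le_add_iff_right]
      refine ih _ hd0 ?_
      rw [PySem.Int.floordiv_lt_iff_lt_mul (by omega : (0:Int) < a + 1)]
      rw [pow_succ] at hlt
      exact hlt
    · rw [pv_digits_nonpos (by omega)]; simp

-- the first l digits of n are the digits of n mod (a+1)^l, padded with "0" entries when n has more digits
theorem pv_digits_take (a : Int) (ha : 1 ≤ a) :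
    ∀ (lp : Nat) (n : Int), 0 ≤ n → (a + 1) ^ lp ≤ n →
      (pvDigits n a).take lp =
        pvDigits (PySem.Int.mod n ((a + 1) ^ lp)) a ++
          List.replicate (lp - (pvDigits (PySem.Int.mod n ((a + 1) ^ lp)) a).length) "0" := by
  intro lp
  induction lp with
  | zero =>
    intro n h0 hge
    rw [pow_zero, show PySem.Int.mod n 1 = 0 by
          rw [PySem.Int.mod_eq_emod_of_pos one_pos, Int.emod_one],
        pv_digits_nonpos le_rfl]
    simp
  | succ lp ih =>
    intro n h0 hge
    have hb : (0:Int) < a + 1 := by omega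
    have hMpos : (0:Int) < (a + 1) ^ lp := pow_pos hb lp
    have hn : 0 < n := by
      have h1 := pow_pos hb (lp + 1); omega
    obtain ⟨hd0, _⟩ := pv_fdiv_facts hn (by omega : 2 ≤ a + 1)
    set n1 := PySem.Int.floordiv n (a + 1) with hn1
    set q := PySem.Int.mod n ((a + 1) ^ (lp + 1)) with hqdef
    have hq0 : 0 ≤ q := PySem.Int.mod_nonneg _ (pow_pos hb _)
    have hsplit : (a + 1) ^ (lp + 1) = (a + 1) * (a + 1) ^ lp := pow_succ' (a + 1) lp
    have e1 : PySem.Int.mod q (a + 1) = PySem.Int.mod n (a + 1) := by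
      rw [hqdef, hsplit]; exact pv_mod_mod h0 hb hMpos
    have e2 : PySem.Int.floordiv q (a + 1) = PySem.Int.mod n1 ((a + 1) ^ lp) := by
      rw [hqdef, hn1, hsplit]; exact pv_fdiv_mod h0 hb hMpos
    have hge1 : (a + 1) ^ lp ≤ n1 := by
      rw [hn1, PySem.Int.le_floordiv_iff_mul_le hb, ← pow_succ]
      exact hge
    rw [pv_digits_unfold ha hn, List.take_succ_cons, ih n1 hd0 hge1]
    by_cases hq : 0 < q
    · rw [pv_digits_unfold ha hq, e2, e1]
      simp only [List.length_cons, List.cons_append]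
      congr 3
      omega
    · have hqz : q = 0 := by omega
      have hm0 : PySem.Int.mod n (a + 1) = 0 := by
        rw [← e1, hqz, PySem.Int.mod_eq_emod_of_pos hb]; simp
      have hmn1 : PySem.Int.mod n1 ((a + 1) ^ lp) = 0 := by
        rw [← e2, hqz, PySem.Int.floordiv_eq_ediv_of_pos hb]; simp
      rw [hqz, hmn1, pv_digits_nonpos le_rfl, hm0, if_neg (by omega)]
      simp [List.replicate_succ, show PySem.Int.toStr 0 = "0" from rfl]

theorem pv_strip_id {q : List String} (hq : q.getLast? ≠ some "0") : pvStripZeros q = q := by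
  cases hq' : q with
  | nil => simp [pvStripZeros]
  | cons x t =>
    rw [pvStripZeros, dif_neg (by simp)]
    rw [if_neg ?_]
    subst hq'
    rw [List.getLast?_eq_getLast (by simp)] at hq
    simpa using hq

theorem pv_strip_pad {q : List String} (hq : q.getLast? ≠ some "0") :
    ∀ j, pvStripZeros (q ++ List.replicate j "0") = q := by
  intro j
  induction j with
  | zero => simpa using pv_strip_id hq
  | succ j ihj =>
    have hne : (List.replicate (j + 1) "0" : List String) ≠ [] := by simp
    have hgne : q ++ List.replicate (j + 1) "0" ≠ [] := by simp
    rw [pvStripZeros, dif_neg hgne, if_pos ?_]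
    · rw [List.dropLast_append_of_ne_nil hne, List.dropLast_replicate]
      simpa using ihj
    · rw [List.getLast_append]
      simp [List.getLast_replicate]

theorem pv_matrixLoop_nonpos (f : Nat) (n l a : Int) (m : List String) (i : Int) (hn : n ≤ 0) :
    pvMatrixLoop f n l a m i = m := by
  have h : ¬ 0 < n := by omega
  cases f <;> simp [pvMatrixLoop, h]

theorem pv_matrixLoop_succ (f : Nat) (n l a : Int) (m : List String) (i : Int) (hn : 0 < n) :
    pvMatrixLoop (f + 1) n l a m i =
      pvMatrixLoop f (PySem.Int.floordiv n ((a + 1) ^ l.toNat)) l a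
        (pvSetAt m i (pvUpword (PySem.Int.mod n ((a + 1) ^ l.toNat)) l a)) (i - 1) := by
  simp only [pvMatrixLoop, if_pos hn]

theorem pv_groupLoop_stop (f : Nat) (ds rows : List String) (i k l : Int)
    (h : ¬ k < (ds.length : Int)) : pvGroupLoop f ds rows i k l = rows := by
  cases f <;> simp [pvGroupLoop, h]

theorem pv_groupLoop_succ (f : Nat) (ds rows : List String) (i k l : Int)
    (h : k < (ds.length : Int)) :
    pvGroupLoop (f + 1) ds rows i k l =
      pvGroupLoop f ds
        (pvSetAt rows i (String.ofList (pvRjust (pvJoinRev (pvStripZeros (PySem.List.slice ds (some k) (some (k + l))))) l)))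
        (i - 1) (k + l) l := by
  simp only [pvGroupLoop, if_pos h]

-- the main loop correspondence: A's chunked re-extraction equals B's grouped single digit pass
theorem pv_main (a l : Int) (ha : 1 ≤ a) (hl : 1 ≤ l) (ds : List String) :
    ∀ (N fA fB : Nat) (n : Int) (rows : List String) (i : Int) (K : Nat),
      0 ≤ n → n.toNat ≤ N → n.toNat < fA → (pvDigits n a).length < fB →
      List.drop K ds = pvDigits n a →
      pvMatrixLoop fA n l a rows i = pvGroupLoop fB ds rows i (K : Int) l := by
  have hb : (0:Int) < a + 1 := by omega
  have hBpos : (0:Int) < (a + 1) ^ l.toNat := pow_pos hb _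
  have h2B : (2:Int) ≤ (a + 1) ^ l.toNat := by
    calc (2:Int) ≤ a + 1 := by omega
    _ ≤ (a + 1) ^ l.toNat := le_self_pow₀ (by omega) (by omega)
  intro N
  induction N with
  | zero =>
    intro fA fB n rows i K h0 hN hfA hfB hdrop
    have hn0 : n = 0 := by omega
    subst hn0
    rw [pv_matrixLoop_nonpos _ _ _ _ _ _ le_rfl]
    have hlen : ds.length ≤ K := List.drop_eq_nil_iff.mp (by rw [hdrop, pv_digits_nonpos le_rfl])
    rw [pv_groupLoop_stop _ _ _ _ _ _ (by omega)]
  | succ N ih =>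
    intro fA fB n rows i K h0 hN hfA hfB hdrop
    by_cases hn : 0 < n
    · obtain ⟨hd0, hdlt⟩ := pv_fdiv_facts hn h2B
      obtain ⟨fA', rfl⟩ : ∃ x, fA = x + 1 := ⟨fA - 1, by omega⟩
      have hlen1 : 0 < (pvDigits n a).length := List.length_pos_iff.mpr (pv_digits_ne_nil ha hn)
      obtain ⟨fB', rfl⟩ : ∃ x, fB = x + 1 := ⟨fB - 1, by omega⟩
      have hKlen : K < ds.length := by
        by_contra hcon
        have h1 : List.drop K ds = [] := List.drop_eq_nil_iff.mpr (by omega)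
        rw [hdrop] at h1
        exact pv_digits_ne_nil ha hn h1
      have hKlt : (K : Int) < (ds.length : Int) := by omega
      rw [pv_matrixLoop_succ _ _ _ _ _ _ hn, pv_groupLoop_succ _ _ _ _ _ _ hKlt]
      have hKl : (K : Int) + l = ((K + l.toNat : Nat) : Int) := by push_cast; omega
      rw [hKl, PySem.List.slice_natCast]
      have htake : List.take (K + l.toNat - K) (List.drop K ds) = List.take l.toNat (pvDigits n a) := by
        rw [hdrop]; congr 1; omega
      rw [htake]
      set q := PySem.Int.mod n ((a + 1) ^ l.toNat) with hqdef
      have hq0 : 0 ≤ q := PySem.Int.mod_nonneg _ hBpos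
      have hstrip : pvStripZeros (List.take l.toNat (pvDigits n a)) = pvDigits q a := by
        by_cases hcase : (a + 1) ^ l.toNat ≤ n
        · rw [pv_digits_take a ha l.toNat n h0 hcase]
          exact pv_strip_pad (pv_digits_last ha hq0) _
        · have hmod : q = n := by
            rw [hqdef, PySem.Int.mod_eq_emod_of_pos hBpos, Int.emod_eq_of_lt h0 (by omega)]
          rw [List.take_of_length_le (pv_digits_len_le a ha l.toNat n h0 (by omega)), hmod]
          have h1 := pv_strip_pad (pv_digits_last ha h0) 0
          simpa using h1
      rw [hstrip, ← pv_upword_eq ha hq0]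
      have hdrop2 : List.drop (K + l.toNat) ds
          = pvDigits (PySem.Int.floordiv n ((a + 1) ^ l.toNat)) a := by
        rw [pv_digits_drop a ha l.toNat n h0, ← hdrop, List.drop_drop]
      have hlen2 : (pvDigits (PySem.Int.floordiv n ((a + 1) ^ l.toNat)) a).length < fB' := by
        rw [pv_digits_drop a ha l.toNat n h0, List.length_drop]
        omega
      exact ih fA' fB' _ _ (i - 1) (K + l.toNat) hd0 (by omega) (by omega) hlen2 hdrop2
    · have hn0 : n = 0 := by omega
      subst hn0
      rw [pv_matrixLoop_nonpos _ _ _ _ _ _ le_rfl]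
      have hlen : ds.length ≤ K := List.drop_eq_nil_iff.mp (by rw [hdrop, pv_digits_nonpos le_rfl])
      rw [pv_groupLoop_stop _ _ _ _ _ _ (by omega)]

-- ===== VERDICT (by name: the statement is the Claim_ definition above) =====
theorem generateUpmatrix_spec : Claim_equal_generateUpmatrix := by
  intro n l w a _hdom hpre
  unfold Spec_generateUpmatrix
  show generateUpmatrix n l w a = generateUpmatrix_alt n l w a
  simp only [generateUpmatrix, generateUpmatrix_alt]
  by_cases hn : n ≤ 0
  · rw [pv_matrixLoop_nonpos _ _ _ _ _ _ hn, pv_digitsLoop_nonpos _ _ _ _ hn,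
        pv_groupLoop_stop _ _ _ _ _ _ (by simp)]
  · obtain ⟨ha, hl, hw, _⟩ := hpre.resolve_left hn
    have h := pv_main a l ha hl (pvDigits n a) n.toNat (n.toNat + 1) ((pvDigits n a).length + 1)
      n ((List.range w.toNat).map (fun _ => pvZeros l)) (w - 1) 0
      (by omega) le_rfl (by omega) (by omega) (by simp)
    simpa [pvDigits] using h
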